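-- pv_equiv track=rewrite | github.com/sqsxwj520/python | 文本处理/day1/test10.py | get_human_str
-- ===== SOURCE A (Python) =====
-- def get_human_str(size: int) -> str:
--     units = " KMGTP"
--     # units = ['', 'K', 'M', 'G', 'T', 'P']
--     index = 0
--     length = len(units)
--     while size >= 1000 and index < length - 1:  # and后是考虑边界问题
--         size //= 1000
--         index += 1
--
--     return '{}{}'.format(size, units[index])
-- ===== SOURCE B (Python) =====
-- def get_human_str(size: int) -> str:
--     units = " KMGTP"
--     index = sum(1 for i in range(1, 6) if size >= 1000 ** i)
--     return '{}{}'.format(size // 1000 ** index, units[index])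
-- ===== Notes on version B (the rewrite author's own statement) =====
-- stated objective: alternative
-- what changed: Replaces the repeated destructive floor-division loop by counting how many thresholds 1000^1..1000^5 the value clears and performing a single division by 1000^index.
import Mathlib
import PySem

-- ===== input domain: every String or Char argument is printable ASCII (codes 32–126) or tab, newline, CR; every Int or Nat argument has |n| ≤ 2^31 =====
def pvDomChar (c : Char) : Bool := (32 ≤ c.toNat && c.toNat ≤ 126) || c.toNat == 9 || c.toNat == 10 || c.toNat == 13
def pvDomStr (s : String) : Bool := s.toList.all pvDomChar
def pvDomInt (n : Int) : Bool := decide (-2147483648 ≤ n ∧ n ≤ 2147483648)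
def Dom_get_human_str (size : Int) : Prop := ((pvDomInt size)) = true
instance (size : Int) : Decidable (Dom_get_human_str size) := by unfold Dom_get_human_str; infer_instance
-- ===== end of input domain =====

-- B replaces A's repeated floor-division loop by a direct threshold count (how many of
-- 1000^1..1000^5 the value clears) followed by a single division; same output, alternative decomposition.

-- ===== PORT A =====
-- the while loop: state (size, index), runs while size >= 1000 and index < len(units)-1 = 5
def pvALoop (size : Int) (index : Nat) : Int × Nat :=
  if h : size ≥ 1000 ∧ index < 5 then
    pvALoop (PySem.Int.floordiv size 1000) (index + 1)
  else (size, index)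
termination_by 5 - index
decreasing_by omega

def get_human_str (size : Int) : String :=
  let units := " KMGTP"
  let p := pvALoop size 0
  -- '{}{}'.format(size, units[index]); index ≤ 5 < len(units) so units[index] never raises
  PySem.Int.toStr p.1 ++ String.ofList [(PySem.Str.pyGet? units (p.2 : Int)).getD ' ']

-- ===== PORT B =====
def get_human_str_alt (size : Int) : String :=
  let units := " KMGTP"
  -- index = sum(1 for i in range(1, 6) if size >= 1000 ** i); i ranges over 1..5 so i.toNat is exact
  let index : Int :=
    ((PySem.List.pyRange 1 6 1).map (fun i => if size ≥ 1000 ^ i.toNat then (1 : Int) else 0)).sum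
  -- size // 1000 ** index; 0 ≤ index ≤ 5 so index.toNat is exact
  PySem.Int.toStr (PySem.Int.floordiv size (1000 ^ index.toNat)) ++
    String.ofList [(PySem.Str.pyGet? units index).getD ' ']

-- ===== PRECONDITION & SPEC =====
def Spec_get_human_str (size : Int) (out : String) : Prop := out = get_human_str_alt size
instance (size : Int) (out : String) : Decidable (Spec_get_human_str size out) := by unfold Spec_get_human_str; infer_instance

-- ===== CLAIM (what is proved, stated in full; the proofs are below) =====
def Claim_equal_get_human_str : Prop := ∀ (size : Int), Dom_get_human_str size → Spec_get_human_str size (get_human_str size)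

-- ===== LEMMAS AND PROOFS =====

lemma pvALoop_stop (size : Int) (i : Nat) (h : ¬ (size ≥ 1000 ∧ i < 5)) :
    pvALoop size i = (size, i) := by
  rw [pvALoop]; simp [h]

lemma pvALoop_step (size : Int) (i : Nat) (h : size ≥ 1000 ∧ i < 5) :
    pvALoop size i = pvALoop (PySem.Int.floordiv size 1000) (i + 1) := by
  rw [pvALoop]; simp [h]

lemma pvFdFd (a b c : Int) (hb : 0 < b) (hc : 0 < c) :
    PySem.Int.floordiv (PySem.Int.floordiv a b) c = PySem.Int.floordiv a (b * c) := by
  rw [PySem.Int.floordiv_eq_ediv_of_pos hb, PySem.Int.floordiv_eq_ediv_of_pos hc,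
    PySem.Int.floordiv_eq_ediv_of_pos (b:=b*c) (by positivity), Int.ediv_ediv_of_nonneg (le_of_lt hb)]

theorem get_human_str_spec : Claim_equal_get_human_str := by
  intro size hdom
  have hd : size ≤ 2147483648 := by
    unfold Dom_get_human_str pvDomInt at hdom
    exact (of_decide_eq_true hdom).2
  unfold Spec_get_human_str get_human_str get_human_str_alt
  have hr : PySem.List.pyRange 1 6 1 = [1, 2, 3, 4, 5] := by decide
  rw [hr]
  rcases lt_or_ge size 1000 with h1 | h1
  · -- index 0
    have hA : pvALoop size 0 = (size, 0) := pvALoop_stop _ _ (by omega)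
    rw [hA]
    simp only [List.map, List.sum_cons, List.sum_nil]
    norm_num [show ¬ (1000:Int) ≤ size from by omega,
      show ¬ (1000000:Int) ≤ size from by omega,
      show ¬ (1000000000:Int) ≤ size from by omega,
      show ¬ (1000000000000:Int) ≤ size from by omega,
      show ¬ (1000000000000000:Int) ≤ size from by omega,
      show Int.toNat 2 = 2 from rfl, show Int.toNat 3 = 3 from rfl,
      show Int.toNat 4 = 4 from rfl, show Int.toNat 5 = 5 from rfl, PySem.Int.floordiv]
  rcases lt_or_ge size 1000000 with h2 | h2
  · -- index 1
    have hA : pvALoop size 0 = (PySem.Int.floordiv size 1000, 1) := by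
      rw [pvALoop_step _ _ ⟨h1, by norm_num⟩, pvALoop_stop]
      have : PySem.Int.floordiv size 1000 < 1000 := by
        rw [PySem.Int.floordiv_lt_iff_lt_mul (by norm_num)]; omega
      omega
    rw [hA]
    simp only [List.map, List.sum_cons, List.sum_nil]
    norm_num [show (1000:Int) ≤ size from h1,
      show ¬ (1000000:Int) ≤ size from by omega,
      show ¬ (1000000000:Int) ≤ size from by omega,
      show ¬ (1000000000000:Int) ≤ size from by omega,
      show ¬ (1000000000000000:Int) ≤ size from by omega,
      show Int.toNat 2 = 2 from rfl, show Int.toNat 3 = 3 from rfl,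
      show Int.toNat 4 = 4 from rfl, show Int.toNat 5 = 5 from rfl, PySem.Int.floordiv]
  rcases lt_or_ge size 1000000000 with h3 | h3
  · -- index 2
    have e2 : PySem.Int.floordiv (PySem.Int.floordiv size 1000) 1000
        = PySem.Int.floordiv size 1000000 := by
      rw [pvFdFd _ _ _ (by norm_num) (by norm_num)]; norm_num
    have hA : pvALoop size 0 = (PySem.Int.floordiv size 1000000, 2) := by
      rw [pvALoop_step _ _ ⟨h1, by norm_num⟩,
          pvALoop_step _ _ ⟨by rw [ge_iff_le, PySem.Int.le_floordiv_iff_mul_le (by norm_num)]; omega, by norm_num⟩,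
          e2, pvALoop_stop]
      have : PySem.Int.floordiv size 1000000 < 1000 := by
        rw [PySem.Int.floordiv_lt_iff_lt_mul (by norm_num)]; omega
      omega
    rw [hA]
    simp only [List.map, List.sum_cons, List.sum_nil]
    norm_num [show (1000:Int) ≤ size from h1,
      show (1000000:Int) ≤ size from h2,
      show ¬ (1000000000:Int) ≤ size from by omega,
      show ¬ (1000000000000:Int) ≤ size from by omega,
      show ¬ (1000000000000000:Int) ≤ size from by omega,
      show Int.toNat 2 = 2 from rfl, show Int.toNat 3 = 3 from rfl,
      show Int.toNat 4 = 4 from rfl, show Int.toNat 5 = 5 from rfl, PySem.Int.floordiv]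
  · -- index 3 (size ≤ 2^31 < 1000^4, so the loop cannot go further)
    have e2 : PySem.Int.floordiv (PySem.Int.floordiv size 1000) 1000
        = PySem.Int.floordiv size 1000000 := by
      rw [pvFdFd _ _ _ (by norm_num) (by norm_num)]; norm_num
    have e3 : PySem.Int.floordiv (PySem.Int.floordiv size 1000000) 1000
        = PySem.Int.floordiv size 1000000000 := by
      rw [pvFdFd _ _ _ (by norm_num) (by norm_num)]; norm_num
    have hA : pvALoop size 0 = (PySem.Int.floordiv size 1000000000, 3) := by
      rw [pvALoop_step _ _ ⟨h1, by norm_num⟩,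
          pvALoop_step _ _ ⟨by rw [ge_iff_le, PySem.Int.le_floordiv_iff_mul_le (by norm_num)]; omega, by norm_num⟩,
          e2,
          pvALoop_step _ _ ⟨by rw [ge_iff_le, PySem.Int.le_floordiv_iff_mul_le (by norm_num)]; omega, by norm_num⟩,
          e3, pvALoop_stop]
      have : PySem.Int.floordiv size 1000000000 < 1000 := by
        rw [PySem.Int.floordiv_lt_iff_lt_mul (by norm_num)]; omega
      omega
    rw [hA]
    simp only [List.map, List.sum_cons, List.sum_nil]
    norm_num [show (1000:Int) ≤ size from h1,
      show (1000000:Int) ≤ size from h2,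
      show (1000000000:Int) ≤ size from h3,
      show ¬ (1000000000000:Int) ≤ size from by omega,
      show ¬ (1000000000000000:Int) ≤ size from by omega,
      show Int.toNat 2 = 2 from rfl, show Int.toNat 3 = 3 from rfl,
      show Int.toNat 4 = 4 from rfl, show Int.toNat 5 = 5 from rfl, PySem.Int.floordiv]
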